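-- pv_equiv track=rewrite | github.com/ASSERT-KTH/Mokav | experiments/pynguin/c4b/return-lst/generated_tests/src_2189/2/src_2189.py | func
-- ===== SOURCE A (Python) =====
-- def func(*args):
-- 	ret_values = []
--
-- 	n = int(args[0])
-- 	kartu = 10
-- 	powarray = [1, 2, 3, 4, 5, 6, 7, 8, 9, 11]
-- 	for i in range(len(powarray)):
-- 	    if ((kartu + powarray[i]) == n):
-- 	        ret_values.append('4')
-- 	if ((kartu + 10) == n):
-- 	    ret_values.append('15')
-- 	elif ((n <= 10) or (n > 21)):
-- 	    ret_values.append('0')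
--
-- 	return ret_values
-- ===== SOURCE B (Python) =====
-- def func(*args):
--     n = int(args[0])
--     # A's result is always exactly one label; select it by table lookup:
--     # the index is the count of satisfied nested conditions (inside (10,21]? then also equal to 20?).
--     return [('0', '4', '15')[(10 < n <= 21) + (n == 20)]]
-- ===== Notes on version B (the rewrite author's own statement) =====
-- stated objective: simpler
-- what changed: Replaced A's accumulator built by a powarray table scan plus a staged if/elif append with a single arithmetic table lookup: the label is picked from ('0','4','15') at the index given by the sum of two boolean tests (10<n<=21 and n==20), exploiting that A's result is always exactly one label.
import Mathlib
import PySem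

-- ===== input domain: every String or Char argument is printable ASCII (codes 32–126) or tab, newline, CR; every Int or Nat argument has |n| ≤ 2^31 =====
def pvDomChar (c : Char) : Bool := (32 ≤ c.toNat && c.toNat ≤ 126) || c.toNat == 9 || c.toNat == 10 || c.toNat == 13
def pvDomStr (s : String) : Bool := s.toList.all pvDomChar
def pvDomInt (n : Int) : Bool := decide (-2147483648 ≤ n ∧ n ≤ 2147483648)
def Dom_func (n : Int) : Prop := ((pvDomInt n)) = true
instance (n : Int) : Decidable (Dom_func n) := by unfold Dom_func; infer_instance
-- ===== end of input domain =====

-- B replaces A's table scan + staged appends by one arithmetic table lookup (simpler).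


-- ===== PORT A =====
def func (n : Int) : List String :=
  let ret_values : List String := []
  let kartu : Int := 10
  let powarray : List Int := [1, 2, 3, 4, 5, 6, 7, 8, 9, 11]
  let ret_values := (PySem.List.pyRange 0 (Int.ofNat powarray.length) 1).foldl
    (fun acc i =>
      if kartu + ((PySem.List.pyGet? powarray i).getD 0) == n then acc ++ ["4"] else acc)
    ret_values
  if kartu + 10 == n then ret_values ++ ["15"]
  else if n ≤ 10 || n > 21 then ret_values ++ ["0"]
  else ret_values

-- ===== PORT B =====
-- index into the literal table ('0','4','15'); the computed index is always 0, 1 or 2,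
-- so pyGet? never returns none and .getD "" is exact here
def func_alt (n : Int) : List String :=
  let idx : Int := (if 10 < n ∧ n ≤ 21 then 1 else 0) + (if n = 20 then 1 else 0)
  [(PySem.List.pyGet? ["0", "4", "15"] idx).getD ""]

-- ===== PRECONDITION & SPEC =====
def Spec_func (n : Int) (out : List String) : Prop := out = func_alt n
instance (n : Int) (out : List String) : Decidable (Spec_func n out) := by unfold Spec_func; infer_instance

-- ===== CLAIM (what is proved, stated in full; the proofs are below) =====
def Claim_equal_func : Prop := ∀ (n : Int), Dom_func n → Spec_func n (func n)

-- ===== LEMMAS AND PROOFS =====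
theorem func_eq_alt (n : Int) : func n = func_alt n := by
  have hr : PySem.List.pyRange 0 (Int.ofNat ([1,2,3,4,5,6,7,8,9,11]:List Int).length) 1
      = [0,1,2,3,4,5,6,7,8,9] := by decide
  have g : ∀ (i v : Int), (PySem.List.pyGet? ([1,2,3,4,5,6,7,8,9,11]:List Int) i).getD 0 = v →
      (PySem.List.pyGet? ([1,2,3,4,5,6,7,8,9,11]:List Int) i).getD 0 = v := fun _ _ h => h
  rcases le_or_gt n 10 with h | h
  · simp only [func, func_alt, hr, List.foldl,
      g 0 1 (by decide), g 1 2 (by decide), g 2 3 (by decide), g 3 4 (by decide),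
      g 4 5 (by decide), g 5 6 (by decide), g 6 7 (by decide), g 7 8 (by decide),
      g 8 9 (by decide), g 9 11 (by decide), beq_iff_eq]
    simp [show ¬((11:Int) = n) from by omega, show ¬((12:Int) = n) from by omega,
      show ¬((13:Int) = n) from by omega, show ¬((14:Int) = n) from by omega,
      show ¬((15:Int) = n) from by omega, show ¬((16:Int) = n) from by omega,
      show ¬((17:Int) = n) from by omega, show ¬((18:Int) = n) from by omega,
      show ¬((19:Int) = n) from by omega, show ¬((21:Int) = n) from by omega,
      show ¬((20:Int) = n) from by omega, show ¬(n = (20:Int)) from by omega,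
      show ¬((10:Int) < n ∧ n ≤ 21) from by omega, h, PySem.List.pyGet?, PySem.List.pyIdx?]
  · rcases le_or_gt n 21 with h2 | h2
    · interval_cases n <;> decide
    · simp only [func, func_alt, hr, List.foldl,
        g 0 1 (by decide), g 1 2 (by decide), g 2 3 (by decide), g 3 4 (by decide),
        g 4 5 (by decide), g 5 6 (by decide), g 6 7 (by decide), g 7 8 (by decide),
        g 8 9 (by decide), g 9 11 (by decide), beq_iff_eq]
      simp [show ¬((11:Int) = n) from by omega, show ¬((12:Int) = n) from by omega,
        show ¬((13:Int) = n) from by omega, show ¬((14:Int) = n) from by omega,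
        show ¬((15:Int) = n) from by omega, show ¬((16:Int) = n) from by omega,
        show ¬((17:Int) = n) from by omega, show ¬((18:Int) = n) from by omega,
        show ¬((19:Int) = n) from by omega, show ¬((21:Int) = n) from by omega,
        show ¬((20:Int) = n) from by omega, show ¬(n = (20:Int)) from by omega,
        show ¬((10:Int) < n ∧ n ≤ 21) from by omega, h2, PySem.List.pyGet?, PySem.List.pyIdx?]

-- ===== VERDICT (by name: the statement is the Claim_ definition above) =====
theorem func_spec : Claim_equal_func := by
  intro n _
  unfold Spec_func
  exact func_eq_alt n
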